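-- pv_equiv track=rewrite | github.com/Void0312Aurora/HEI-Reasearch | curriculum/stage1_counting.py | _is_primitive_period
-- ===== SOURCE A (Python) =====
-- def _is_primitive_period(bits: list[int], period: int) -> bool:
--     if period <= 1:
--         return False
--     if all(b == bits[0] for b in bits):
--         return False
--     for d in range(1, period):
--         if period % d != 0:
--             continue
--         ok = True
--         for i in range(period):
--             if bits[i] != bits[i % d]:
--                 ok = False
--                 break
--         if ok:
--             return False
--     return True
-- ===== SOURCE B (Python) =====
-- def _is_primitive_period(bits: list[int], period: int) -> bool:
--     if period <= 1:
--         return False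
--     if all(b == bits[0] for b in bits):
--         return False
--     # collect the distinct prime factors of `period` by trial division
--     fs = []
--     m = period
--     q = 2
--     while q * q <= m:
--         if m % q == 0:
--             fs.append(q)
--             while m % q == 0:
--                 m //= q
--         q += 1
--     if m > 1:
--         fs.append(m)
--     # the prefix is a repetition of a shorter block iff it is (period//q)-shift-periodic
--     # for some prime factor q of period
--     for q in fs:
--         t = period // q
--         if all(bits[i] == bits[i - t] for i in range(t, period)):
--             return False
--     return True
-- ===== Notes on version B (the rewrite author's own statement) =====
-- stated objective: alternative
-- what changed: A tests every proper divisor d of period with a modular index scan bits[i]==bits[i%d]; B trial-divides period to get its distinct prime factors and tests only the maximal proper divisors period//q with a shift comparison bits[i]==bits[i-t], relying on the fact that a block repetition at some proper divisor lifts to one at a maximal proper divisor.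
import Mathlib
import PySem

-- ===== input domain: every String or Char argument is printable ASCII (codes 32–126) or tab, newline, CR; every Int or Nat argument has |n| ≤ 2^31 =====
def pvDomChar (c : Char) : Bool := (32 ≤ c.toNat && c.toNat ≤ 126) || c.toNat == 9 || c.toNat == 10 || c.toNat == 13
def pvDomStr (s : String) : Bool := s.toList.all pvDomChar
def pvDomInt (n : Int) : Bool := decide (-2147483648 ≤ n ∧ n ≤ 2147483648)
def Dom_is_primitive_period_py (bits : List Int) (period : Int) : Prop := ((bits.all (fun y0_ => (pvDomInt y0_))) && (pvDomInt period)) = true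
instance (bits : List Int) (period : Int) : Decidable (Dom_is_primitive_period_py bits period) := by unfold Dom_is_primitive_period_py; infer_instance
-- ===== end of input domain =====

-- B replaces A's trial of EVERY proper divisor d of `period` (each verified by a modular
-- index scan) by a check of only the maximal proper divisors period//q, one per distinct
-- prime factor q of period, each verified by a shift comparison (objective: alternative).

-- ===== PORT A =====
-- inner `for i in range(period)` loop with its ok/break flag: `all` short-circuits like the break.
-- Python indexing bits[i] is ported as getD with default 0: inside Pre_ every index
-- reached is in range, and outside Pre_ (where Python raises IndexError) nothing is claimed.
def aInner (bits : List Int) (n d : Nat) : Bool :=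
  (List.range n).all fun i => bits.getD i 0 == bits.getD (i % d) 0

-- outer `for d in range(1, period)` loop with continue / early `return False`
def aOuter (bits : List Int) (n : Nat) : List Nat → Bool
  | [] => true
  | d :: rest =>
    if n % d ≠ 0 then aOuter bits n rest
    else if aInner bits n d then false
    else aOuter bits n rest

-- range(1, period) with period ≥ 2 on this branch is ported as List.range' 1 (period.toNat - 1)
def is_primitive_period_py (bits : List Int) (period : Int) : Bool :=
  if period ≤ 1 then false
  else if bits.all (fun b => b == bits.headD 0) then false
  else aOuter bits period.toNat (List.range' 1 (period.toNat - 1))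

-- ===== PORT B =====
-- inner `while m % q == 0: m //= q` loop (the extra guard conjuncts 2 ≤ q, 0 < m only
-- make the recursion total; they hold whenever the loop runs in context)
def stripB (m q : Nat) : Nat :=
  if h : m % q = 0 ∧ 2 ≤ q ∧ 0 < m then stripB (m / q) q else m
termination_by m
decreasing_by exact Nat.div_lt_self h.2.2 (by omega)

-- termination helper for the outer trial-division loop, cited by its decreasing_by
theorem stripB_le (m q : Nat) : stripB m q ≤ m := by
  unfold stripB
  split
  · next h => exact le_trans (stripB_le (m / q) q) (Nat.div_le_self m q)
  · exact le_refl m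
termination_by m
decreasing_by next h => exact Nat.div_lt_self h.2.2 (by omega)

-- outer `while q * q <= m` trial-division loop; returns the final m together with fs
-- (guard conjunct 1 ≤ q only makes the recursion total)
def factorLoopB (q m : Nat) (fs : List Nat) : Nat × List Nat :=
  if h : q * q ≤ m ∧ 1 ≤ q then
    if m % q = 0 then factorLoopB (q + 1) (stripB m q) (fs ++ [q])
    else factorLoopB (q + 1) m fs
  else (m, fs)
termination_by m + 1 - q
decreasing_by
  · have h1 : q ≤ m := le_trans (Nat.le_mul_of_pos_left q h.2) h.1
    have h2 : stripB m q ≤ m := stripB_le m q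
    omega
  · have h1 : q ≤ m := le_trans (Nat.le_mul_of_pos_left q h.2) h.1
    omega

-- the fs / m / q block of B up to `if m > 1: fs.append(m)`
def primeFactorsB (n : Nat) : List Nat :=
  let r := factorLoopB 2 n []
  if 1 < r.1 then r.2 ++ [r.1] else r.2

-- `all(bits[i] == bits[i - t] for i in range(t, period))`; indexing as in port A
def bCheck (bits : List Int) (n t : Nat) : Bool :=
  (List.range' t (n - t)).all fun i => bits.getD i 0 == bits.getD (i - t) 0

-- `for q in fs` loop with early `return False`
def bLoop (bits : List Int) (n : Nat) : List Nat → Bool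
  | [] => true
  | q :: rest => if bCheck bits n (n / q) then false else bLoop bits n rest

def is_primitive_period_py_alt (bits : List Int) (period : Int) : Bool :=
  if period ≤ 1 then false
  else if bits.all (fun b => b == bits.headD 0) then false
  else bLoop bits period.toNat (primeFactorsB period.toNat)

-- ===== PRECONDITION & SPEC =====
-- Exactly the inputs on which Python A returns: A raises IndexError iff 2 ≤ period,
-- bits is non-constant, period > len(bits), and moreover some proper divisor d of period
-- lets the inner scan run past the end of bits before hitting a mismatch — i.e. either
-- some proper divisor d ≥ len(bits) exists (equivalently period / minFac(period) ≥ len)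
-- or some proper divisor d < len(bits) matches bits modulo d on all in-range indices.
def Pre_is_primitive_period_py (bits : List Int) (period : Int) : Prop :=
  period ≤ 1 ∨ (∀ b ∈ bits, b = bits.headD 0) ∨ period ≤ (bits.length : Int) ∨
    (period.toNat / (period.toNat.minFac) < bits.length ∧
      ∀ d, 1 ≤ d → d < bits.length → period.toNat % d = 0 →
        ∃ i < bits.length, bits.getD i 0 ≠ bits.getD (i % d) 0)

instance (bits : List Int) (period : Int) : Decidable (Pre_is_primitive_period_py bits period) := by
  unfold Pre_is_primitive_period_py; infer_instance

def pvWitness_is_primitive_period_py : List Int × Int := ([1, 0, 1, 1], 4)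

def Spec_is_primitive_period_py (bits : List Int) (period : Int) (out : Bool) : Prop := out = is_primitive_period_py_alt bits period
instance (bits : List Int) (period : Int) (out : Bool) : Decidable (Spec_is_primitive_period_py bits period out) := by unfold Spec_is_primitive_period_py; infer_instance

-- ===== CLAIM (what is proved, stated in full; the proofs are below) =====
def Claim_equal_is_primitive_period_py : Prop := ∀ (bits : List Int) (period : Int), Dom_is_primitive_period_py bits period → Pre_is_primitive_period_py bits period → Spec_is_primitive_period_py bits period (is_primitive_period_py bits period)

-- ===== LEMMAS AND PROOFS =====

-- bits is "modularly d-periodic" on the first n (totalized) positions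
def modP (bits : List Int) (n d : Nat) : Prop :=
  ∀ i < n, bits.getD i 0 = bits.getD (i % d) 0

-- bits is "shift t-periodic" on the first n (totalized) positions
def shiftP (bits : List Int) (n t : Nat) : Prop :=
  ∀ i, t ≤ i → i < n → bits.getD i 0 = bits.getD (i - t) 0

theorem aInner_iff (bits : List Int) (n d : Nat) :
    aInner bits n d = true ↔ modP bits n d := by
  simp [aInner, modP, List.all_eq_true, List.mem_range]

theorem aOuter_true_iff (bits : List Int) (n : Nat) (ds : List Nat) :
    aOuter bits n ds = true ↔ ∀ d ∈ ds, n % d = 0 → ¬ modP bits n d := by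
  induction ds with
  | nil => simpa using (by rfl : aOuter bits n [] = true)
  | cons d rest ih =>
    simp only [aOuter]
    split
    · next h => simp_all
    · next h =>
      split
      · next h2 =>
        simp only [Bool.false_eq_true, false_iff]
        intro hall
        exact hall d (by simp) (by omega) ((aInner_iff bits n d).mp h2)
      · next h2 =>
        rw [ih]
        constructor
        · intro hall d' hd' hdvd
          rcases List.mem_cons.mp hd' with rfl | hm
          · intro hmod; exact h2 ((aInner_iff bits n d').mpr hmod)
          · exact hall d' hm hdvd
        · intro hall d' hd' hdvd; exact hall d' (List.mem_cons_of_mem _ hd') hdvd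

theorem bCheck_iff (bits : List Int) (n t : Nat) :
    bCheck bits n t = true ↔ shiftP bits n t := by
  simp only [bCheck, shiftP, List.all_eq_true, List.mem_range'_1, beq_iff_eq]
  constructor
  · intro h i h1 h2; exact h i ⟨h1, by omega⟩
  · intro h i ⟨h1, h2⟩; exact h i h1 (by omega)

theorem bLoop_true_iff (bits : List Int) (n : Nat) (qs : List Nat) :
    bLoop bits n qs = true ↔ ∀ q ∈ qs, ¬ shiftP bits n (n / q) := by
  induction qs with
  | nil => simpa using (by rfl : bLoop bits n [] = true)
  | cons q rest ih =>
    simp only [bLoop]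
    split
    · next h =>
      simp only [Bool.false_eq_true, false_iff]
      intro hall
      exact hall q (by simp) ((bCheck_iff bits n (n / q)).mp h)
    · next h =>
      rw [ih]
      constructor
      · intro hall q' hq'
        rcases List.mem_cons.mp hq' with rfl | hm
        · intro hs; exact h ((bCheck_iff bits n (n / q')).mpr hs)
        · exact hall q' hm
      · intro hall q' hq'; exact hall q' (List.mem_cons_of_mem _ hq')

theorem shift_iff_mod (bits : List Int) (n t : Nat) (ht : 1 ≤ t) :
    shiftP bits n t ↔ modP bits n t := by
  constructor
  · intro hs i
    induction i using Nat.strong_induction_on with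
    | _ i ih =>
      intro hi
      by_cases hti : t ≤ i
      · have h1 := hs i hti hi
        have h2 := ih (i - t) (by omega) (by omega)
        rw [h1, h2, ← Nat.mod_eq_sub_mod hti]
      · rw [Nat.mod_eq_of_lt (by omega)]
  · intro hm i hti hi
    have h1 := hm i hi
    have h2 := hm (i - t) (by omega)
    rw [h1, h2, Nat.mod_eq_sub_mod hti]

theorem mod_lift (bits : List Int) (n d e : Nat) (hde : d ∣ e)
    (h : modP bits n d) : modP bits n e := by
  intro i hi
  have h1 := h i hi
  have h2 := h (i % e) (lt_of_le_of_lt (Nat.mod_le i e) hi)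
  rw [h1, h2, Nat.mod_mod_of_dvd i hde]

theorem pvModZeroOfDvd {a b : Nat} (h : a ∣ b) : b % a = 0 := by
  obtain ⟨k, rfl⟩ := h; exact Nat.mul_mod_right a k

theorem stripB_dvd (m q : Nat) : stripB m q ∣ m := by
  unfold stripB
  split
  · next h =>
    have hq : q ∣ m := Nat.dvd_of_mod_eq_zero h.1
    exact dvd_trans (stripB_dvd (m / q) q) (Nat.div_dvd_of_dvd hq)
  · exact dvd_refl m
termination_by m
decreasing_by next h => exact Nat.div_lt_self h.2.2 (by omega)

theorem stripB_pos (m q : Nat) (hm : 0 < m) : 0 < stripB m q := by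
  unfold stripB
  split
  · next h =>
    have hq : q ∣ m := Nat.dvd_of_mod_eq_zero h.1
    exact stripB_pos (m / q) q (Nat.div_pos (Nat.le_of_dvd hm hq) (by omega))
  · exact hm
termination_by m
decreasing_by next h => exact Nat.div_lt_self h.2.2 (by omega)

theorem stripB_not_dvd (m q : Nat) (hq : 2 ≤ q) (hm : 0 < m) : ¬ q ∣ stripB m q := by
  unfold stripB
  split
  · next h =>
    have hqd : q ∣ m := Nat.dvd_of_mod_eq_zero h.1
    exact stripB_not_dvd (m / q) q hq (Nat.div_pos (Nat.le_of_dvd hm hqd) (by omega))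
  · next h =>
    intro hdvd
    exact h ⟨pvModZeroOfDvd hdvd, hq, hm⟩
termination_by m
decreasing_by next h => exact Nat.div_lt_self h.2.2 (by omega)

theorem stripB_prime_dvd (m q p : Nat) (hp : p.Prime) (hqp : q.Prime)
    (hpm : p ∣ m) (hne : p ≠ q) : p ∣ stripB m q := by
  unfold stripB
  split
  · next h =>
    have hq : q ∣ m := Nat.dvd_of_mod_eq_zero h.1
    have hmeq : q * (m / q) = m := Nat.mul_div_cancel' hq
    have : p ∣ q * (m / q) := by rw [hmeq]; exact hpm
    rcases (Nat.Prime.dvd_mul hp).mp this with hpq | hpd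
    · exact absurd ((Nat.prime_dvd_prime_iff_eq hp hqp).mp hpq) hne
    · exact stripB_prime_dvd (m / q) q p hp hqp hpd hne
  · exact hpm
termination_by m
decreasing_by next h => exact Nat.div_lt_self h.2.2 (by omega)

theorem factorLoopB_spec (q m : Nat) (fs : List Nat) (n : Nat)
    (hq : 2 ≤ q) (hm : 0 < m) (hmn : m ∣ n)
    (hlow : ∀ p, p.Prime → p ∣ m → q ≤ p)
    (hfs1 : ∀ x ∈ fs, 2 ≤ x ∧ x ∣ n)
    (hfs2 : ∀ p, p.Prime → p ∣ n → p ∈ fs ∨ p ∣ m) :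
    (∀ x ∈ (if 1 < (factorLoopB q m fs).1 then (factorLoopB q m fs).2 ++ [(factorLoopB q m fs).1] else (factorLoopB q m fs).2), 2 ≤ x ∧ x ∣ n)
    ∧ (∀ p, p.Prime → p ∣ n → p ∈ (if 1 < (factorLoopB q m fs).1 then (factorLoopB q m fs).2 ++ [(factorLoopB q m fs).1] else (factorLoopB q m fs).2)) := by
  by_cases hguard : q * q ≤ m ∧ 1 ≤ q
  · by_cases hdiv : m % q = 0
    · -- q divides m; q is prime because every prime factor of m is ≥ q
      have hqdvd : q ∣ m := Nat.dvd_of_mod_eq_zero hdiv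
      have hqp : q.Prime := by
        have h1 : q.minFac ∣ m := dvd_trans (Nat.minFac_dvd q) hqdvd
        have h2 : q ≤ q.minFac := hlow _ (Nat.minFac_prime (by omega)) h1
        have h3 : q.minFac ≤ q := Nat.minFac_le (by omega)
        have h4 : q.minFac = q := le_antisymm h3 h2
        exact h4 ▸ Nat.minFac_prime (by omega : q ≠ 1)
      have hrec := factorLoopB_spec (q + 1) (stripB m q) (fs ++ [q]) n
        (by omega) (stripB_pos m q hm) (dvd_trans (stripB_dvd m q) hmn)
        (by
          intro p hp hpd
          have hpm : p ∣ m := dvd_trans hpd (stripB_dvd m q)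
          have h1 : q ≤ p := hlow p hp hpm
          have h2 : p ≠ q := by
            rintro rfl
            exact stripB_not_dvd m p hq hm hpd
          omega)
        (by
          intro x hx
          rcases List.mem_append.mp hx with hx | hx
          · exact hfs1 x hx
          · rcases List.mem_singleton.mp hx with rfl
            exact ⟨hq, dvd_trans hqdvd hmn⟩)
        (by
          intro p hp hpn
          rcases hfs2 p hp hpn with hin | hpm
          · exact Or.inl (List.mem_append_left _ hin)
          · by_cases hpq : p = q
            · exact Or.inl (List.mem_append_right _ (by simp [hpq]))
            · exact Or.inr (stripB_prime_dvd m q p hp hqp hpm hpq))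
      rw [factorLoopB, dif_pos hguard, if_pos hdiv]
      exact hrec
    · have hrec := factorLoopB_spec (q + 1) m fs n (by omega) hm hmn
        (by
          intro p hp hpd
          have h1 : q ≤ p := hlow p hp hpd
          have h2 : p ≠ q := by
            rintro rfl
            exact hdiv (pvModZeroOfDvd hpd)
          omega)
        hfs1 hfs2
      rw [factorLoopB, dif_pos hguard, if_neg hdiv]
      exact hrec
  · rw [factorLoopB, dif_neg hguard]
    have hlt : m < q * q := by
      rcases Nat.lt_or_ge m (q * q) with h | h
      · exact h
      · exact absurd ⟨h, by omega⟩ hguard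
    by_cases hm1 : 1 < m
    · -- the leftover m is prime
      have hmp : m.Prime := by
        by_contra hnp
        have h1 : q ≤ m.minFac := hlow _ (Nat.minFac_prime (by omega)) (Nat.minFac_dvd m)
        have h2 : m.minFac ^ 2 ≤ m := Nat.minFac_sq_le_self (by omega) hnp
        have h3 : q * q ≤ m.minFac * m.minFac := Nat.mul_le_mul h1 h1
        rw [pow_two] at h2
        omega
      rw [if_pos hm1]
      constructor
      · intro x hx
        rcases List.mem_append.mp hx with hx | hx
        · exact hfs1 x hx
        · rcases List.mem_singleton.mp hx with rfl
          exact ⟨by omega, hmn⟩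
      · intro p hp hpn
        rcases hfs2 p hp hpn with hin | hpm
        · exact List.mem_append_left _ hin
        · have : p = m := (Nat.prime_dvd_prime_iff_eq hp hmp).mp hpm
          exact List.mem_append_right _ (by simp [this])
    · rw [if_neg hm1]
      refine ⟨hfs1, ?_⟩
      intro p hp hpn
      rcases hfs2 p hp hpn with hin | hpm
      · exact hin
      · have hm1' : m = 1 := by omega
        rw [hm1'] at hpm
        exact absurd (Nat.eq_one_of_dvd_one hpm) hp.ne_one
termination_by m + 1 - q
decreasing_by
  · have h1 : q ≤ m := le_trans (Nat.le_mul_of_pos_left q hguard.2) hguard.1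
    have h2 : stripB m q ≤ m := stripB_le m q
    omega
  · have h1 : q ≤ m := le_trans (Nat.le_mul_of_pos_left q hguard.2) hguard.1
    omega

theorem primeFactorsB_spec (n : Nat) (hn : 0 < n) :
    (∀ x ∈ primeFactorsB n, 2 ≤ x ∧ x ∣ n)
    ∧ (∀ p, p.Prime → p ∣ n → p ∈ primeFactorsB n) := by
  have h := factorLoopB_spec 2 n [] n (le_refl 2) hn (dvd_refl n)
    (fun p hp _ => hp.two_le)
    (by intro x hx; simp at hx)
    (fun p _ hpn => Or.inr hpn)
  simpa [primeFactorsB] using h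

theorem loops_eq (bits : List Int) (n : Nat) (hn : 2 ≤ n) :
    aOuter bits n (List.range' 1 (n - 1)) = bLoop bits n (primeFactorsB n) := by
  obtain ⟨hpf1, hpf2⟩ := primeFactorsB_spec n (by omega)
  have hiff : (∀ d ∈ List.range' 1 (n - 1), n % d = 0 → ¬ modP bits n d)
      ↔ (∀ q ∈ primeFactorsB n, ¬ shiftP bits n (n / q)) := by
    constructor
    · intro hall q hq
      obtain ⟨hq2, hqdvd⟩ := hpf1 q hq
      obtain ⟨k, hk⟩ := hqdvd
      have hk1 : 1 ≤ k := by
        rcases Nat.eq_zero_or_pos k with rfl | h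
        · omega
        · exact h
      have ht : n / q = k := by rw [hk, Nat.mul_div_cancel_left k (by omega)]
      have hklt : k < n := by
        have : 2 * k ≤ q * k := Nat.mul_le_mul_right k hq2
        omega
      have hmem : k ∈ List.range' 1 (n - 1) := by
        rw [List.mem_range'_1]; omega
      have hmod : n % k = 0 := by
        rw [hk]; exact Nat.mul_mod_left q k
      intro hs
      exact hall k hmem hmod ((shift_iff_mod bits n k hk1).mp (ht ▸ hs))
    · intro hall d hd hmod hmodP
      rw [List.mem_range'_1] at hd
      have hddvd : d ∣ n := Nat.dvd_of_mod_eq_zero hmod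
      obtain ⟨k, hk⟩ := hddvd
      have hk2 : 2 ≤ k := by
        rcases Nat.lt_or_ge k 2 with h | h
        · interval_cases k <;> omega
        · exact h
      set p := k.minFac with hp
      have hpp : p.Prime := Nat.minFac_prime (by omega)
      have hpk : p ∣ k := Nat.minFac_dvd k
      have hpn : p ∣ n := hk ▸ dvd_mul_of_dvd_right hpk d
      have hpmem : p ∈ primeFactorsB n := hpf2 p hpp hpn
      obtain ⟨s, hs⟩ := hpk
      have hnp : n / p = d * s := by
        rw [hk, hs, show d * (p * s) = p * (d * s) by ring,
          Nat.mul_div_cancel_left _ hpp.pos]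
      have hdt : d ∣ n / p := hnp ▸ Dvd.intro s rfl
      have ht1 : 1 ≤ n / p := by
        have : 0 < d * s := by
          have hs1 : 0 < s := by
            rcases Nat.eq_zero_or_pos s with rfl | h
            · omega
            · exact h
          exact Nat.mul_pos (by omega) hs1
        omega
      have hmodt : modP bits n (n / p) := mod_lift bits n d (n / p) hdt hmodP
      exact hall p hpmem ((shift_iff_mod bits n (n / p) ht1).mpr hmodt)
  rcases ha : aOuter bits n (List.range' 1 (n - 1)) with _ | _ <;>
    rcases hb : bLoop bits n (primeFactorsB n) with _ | _
  · rfl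
  · exact absurd ((bLoop_true_iff bits n (primeFactorsB n)).mp hb)
      (by
        intro h
        have := (aOuter_true_iff bits n (List.range' 1 (n - 1))).mpr (hiff.mpr h)
        simp [this] at ha)
  · exact absurd ((aOuter_true_iff bits n (List.range' 1 (n - 1))).mp ha)
      (by
        intro h
        have := (bLoop_true_iff bits n (primeFactorsB n)).mpr (hiff.mp h)
        simp [this] at hb)
  · rfl

theorem ports_eq (bits : List Int) (period : Int) :
    is_primitive_period_py bits period = is_primitive_period_py_alt bits period := by
  unfold is_primitive_period_py is_primitive_period_py_alt
  split
  · rfl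
  · next h =>
    split
    · rfl
    · exact loops_eq bits period.toNat (by omega)

-- ===== VERDICT (by name: the statement is the Claim_ definition above) =====
theorem is_primitive_period_py_spec : Claim_equal_is_primitive_period_py := by
  intro bits period _ _
  unfold Spec_is_primitive_period_py
  exact ports_eq bits period
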